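-- pv_equiv track=rewrite | github.com/Mobilestars/Cryptology | src/brute-force.py | inverse_permute_text
-- ===== SOURCE A (Python) =====
-- def inverse_permute_text(text: str, code: str) -> str:
--     code_indices = [int(c) - 1 for c in code]
--     n = len(code_indices)
--     result = []
--
--     for i in range(0, len(text), n):
--         block = text[i:i+n]
--         block_len = len(block)
--         orig = [''] * block_len
--
--         for idx, code_idx in enumerate(code_indices):
--             if idx < block_len and code_idx < block_len:
--                 orig[idx] = block[code_idx]
--
--         result.extend(orig)
--
--     return ''.join(result)
-- ===== SOURCE B (Python) =====
-- def inverse_permute_text(text: str, code: str) -> str: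
--     # Single flat pass over output positions: divmod(i, n) locates the block
--     # and the within-block slot; the source character is taken straight from
--     # the block when the decoded position falls inside it.
--     n = len(code)
--     out = []
--     for i in range(len(text)):
--         q, r = divmod(i, n)
--         block = text[q * n:q * n + n]
--         s = int(code[r]) - 1
--         if s < len(block):
--             out.append(block[s])
--     return ''.join(out)
-- ===== Notes on version B (the rewrite author's own statement) =====
-- stated objective: alternative
-- what changed: Replaces A's nested per-block gather (slice a block, allocate a ''-sentinel list, fill it from an enumerated index list, extend an accumulator) with a single flat pass over all output positions using divmod(i, n) to locate block and slot, appending each source character directly; Pre_ excludes only the inputs where A raises a ValueError (empty or non-digit code).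
import Mathlib
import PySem

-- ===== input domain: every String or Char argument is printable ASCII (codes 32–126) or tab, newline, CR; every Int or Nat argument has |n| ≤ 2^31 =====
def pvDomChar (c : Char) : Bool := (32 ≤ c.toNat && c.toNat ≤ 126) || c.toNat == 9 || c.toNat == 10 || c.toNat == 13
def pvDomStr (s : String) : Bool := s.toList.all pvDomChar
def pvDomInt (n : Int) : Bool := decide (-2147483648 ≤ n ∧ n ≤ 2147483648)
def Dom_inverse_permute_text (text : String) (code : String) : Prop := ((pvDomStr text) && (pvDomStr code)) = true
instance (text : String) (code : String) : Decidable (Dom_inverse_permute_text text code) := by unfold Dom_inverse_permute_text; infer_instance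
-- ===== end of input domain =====

-- B replaces A's nested per-block gather (slice, ''-sentinel list, enumerate-fill, extend)
-- with a single flat divmod pass over text positions: an alternative decomposition, same cost.
-- Pre_ excludes exactly the inputs where Python A raises a ValueError (empty or non-digit code).


-- ===== PORT A =====
-- literal transliteration of A; the `.getD 0` / `.getD ' '` totalize spots where Python
-- would raise (non-digit code char, empty code) — all such inputs are outside Pre_.
def inverse_permute_text (text : String) (code : String) : String :=
  let code_indices : List Int := code.toList.map (fun c => (PySem.Int.ofChars? [c]).getD 0 - 1)
  let n : Int := code_indices.length
  let result : List (List Char) :=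
    (PySem.List.pyRange 0 text.toList.length n).foldl (fun result i =>
      let block : List Char := PySem.List.slice text.toList (some i) (some (i + n))
      let block_len : Int := block.length
      let orig : List (List Char) := List.replicate block.length []
      let orig := (PySem.List.enumerate code_indices).foldl (fun orig p =>
        if p.1 < block_len ∧ p.2 < block_len then
          PySem.List.pySetD orig p.1 [(PySem.List.pyGet? block p.2).getD ' ']
        else orig) orig
      result ++ orig) []
  String.ofList (PySem.Chars.join [] result)

-- ===== PORT B =====
-- literal transliteration of Source B's flat divmod pass.
def inverse_permute_text_alt (text : String) (code : String) : String :=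
  let n : Int := code.toList.length
  let t : List Char := text.toList
  let out : List (List Char) :=
    (PySem.List.pyRange 0 t.length 1).foldl (fun out i =>
      let q := PySem.Int.floordiv i n
      let r := PySem.Int.mod i n
      let block : List Char := PySem.List.slice t (some (q * n)) (some (q * n + n))
      let s := (PySem.Int.ofChars? [(PySem.List.pyGet? code.toList r).getD ' ']).getD 0 - 1
      if s < (block.length : Int) then
        out ++ [[(PySem.List.pyGet? block s).getD ' ']]
      else out) []
  String.ofList (PySem.Chars.join [] out)

-- ===== PRECONDITION & SPEC =====
-- Pre_ excludes exactly the inputs on which Python A raises: an empty code string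
-- (range() step 0, ValueError) and a code containing a non-digit char (int(c), ValueError).
def Pre_inverse_permute_text (text : String) (code : String) : Prop :=
  code.toList ≠ [] ∧ code.toList.all PySem.Chars.isdigit = true
instance (text : String) (code : String) : Decidable (Pre_inverse_permute_text text code) := by
  unfold Pre_inverse_permute_text; infer_instance

def pvWitness_inverse_permute_text : String × String := ("ebcadf", "21")

def Spec_inverse_permute_text (text : String) (code : String) (out : String) : Prop := out = inverse_permute_text_alt text code
instance (text : String) (code : String) (out : String) : Decidable (Spec_inverse_permute_text text code out) := by unfold Spec_inverse_permute_text; infer_instance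

-- ===== CLAIM (what is proved, stated in full; the proofs are below) =====
def Claim_equal_inverse_permute_text : Prop := ∀ (text : String) (code : String), Dom_inverse_permute_text text code → Pre_inverse_permute_text text code → Spec_inverse_permute_text text code (inverse_permute_text text code)

-- ===== LEMMAS AND PROOFS =====

def pvCis (cs : List Char) : List Int := cs.map (fun c => (PySem.Int.ofChars? [c]).getD 0 - 1)

def pvInner (cis : List Int) (block : List Char) : List (List Char) :=
  (PySem.List.enumerate cis).foldl (fun orig p =>
    if p.1 < (block.length : Int) ∧ p.2 < (block.length : Int) then
      PySem.List.pySetD orig p.1 [(PySem.List.pyGet? block p.2).getD ' ']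
    else orig) (List.replicate block.length [])

def pvBpiece (t cs : List Char) (i : Int) : List Char :=
  let n : Int := cs.length
  let q := PySem.Int.floordiv i n
  let block : List Char := PySem.List.slice t (some (q * n)) (some (q * n + n))
  let s := (PySem.Int.ofChars? [(PySem.List.pyGet? cs (PySem.Int.mod i n)).getD ' ']).getD 0 - 1
  if s < (block.length : Int) then [(PySem.List.pyGet? block s).getD ' '] else []

def pvBpieceL (t cs : List Char) (i : Int) : List (List Char) :=
  let n : Int := cs.length
  let q := PySem.Int.floordiv i n
  let block : List Char := PySem.List.slice t (some (q * n)) (some (q * n + n))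
  let s := (PySem.Int.ofChars? [(PySem.List.pyGet? cs (PySem.Int.mod i n)).getD ' ']).getD 0 - 1
  if s < (block.length : Int) then [[(PySem.List.pyGet? block s).getD ' ']] else []

theorem pv_fold_len (L : Nat) (V : Int → List Char) (l : List (Int × Int)) :
    ∀ (orig : List (List Char)),
      (l.foldl (fun orig p =>
        if p.1 < (L : Int) ∧ p.2 < (L : Int) then PySem.List.pySetD orig p.1 (V p.2) else orig) orig).length
      = orig.length := by
  induction l with
  | nil => intro orig; rfl
  | cons x l ih =>
    intro orig
    simp only [List.foldl_cons]
    rw [ih]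
    split <;> simp [PySem.List.length_pySetD]

theorem pv_inner_get (L : Nat) (V : Int → List Char) (l : List Int) :
    ∀ (s : Nat) (orig : List (List Char)), orig.length = L → ∀ (j : Nat), j < L →
      ((PySem.List.enumerate l (s : Int)).foldl (fun orig p =>
          if p.1 < (L : Int) ∧ p.2 < (L : Int) then PySem.List.pySetD orig p.1 (V p.2) else orig) orig)[j]?
      = if s ≤ j ∧ j - s < l.length then
          (if l.getD (j - s) 0 < (L : Int) then some (V (l.getD (j - s) 0)) else orig[j]?)
        else orig[j]? := by
  induction l with
  | nil =>
    intro s orig hlen j hj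
    simp [PySem.List.enumerate]
  | cons x l ih =>
    intro s orig hlen j hj
    rw [PySem.List.enumerate_cons, List.foldl_cons]
    have hcast : ((s : Int) + 1) = ((s + 1 : Nat) : Int) := by push_cast; ring
    rw [hcast]
    set orig' := (if (s : Int) < (L : Int) ∧ x < (L : Int) then PySem.List.pySetD orig (s : Int) (V x) else orig) with horig'
    have hlen' : orig'.length = L := by
      rw [horig']; split <;> simp [hlen]
    rw [ih (s + 1) orig' hlen' j hj]
    rcases lt_trichotomy j s with hc | hc | hc
    · -- j < s : no condition fires, orig'[j]? = orig[j]?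
      have h1 : ¬ (s + 1 ≤ j ∧ j - (s + 1) < l.length) := by omega
      have h2 : ¬ (s ≤ j ∧ j - s < l.length + 1) := by omega
      simp only [if_neg h1, List.length_cons, if_neg h2]
      rw [horig']
      split
      · rw [PySem.List.pySetD_of_nonneg _ _ (by positivity)]
        rw [List.getElem?_set_ne (by simpa using by omega)]
      · rfl
    · -- j = s
      subst hc
      have h1 : ¬ (j + 1 ≤ j ∧ j - (j + 1) < l.length) := by omega
      have h2 : (j ≤ j ∧ j - j < l.length + 1) := by omega
      simp only [if_neg h1, List.length_cons, Nat.sub_self, List.getD_cons_zero]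
      rw [if_pos (show j ≤ j ∧ 0 < l.length + 1 by omega)]
      rw [horig']
      by_cases hx : x < (L : Int)
      · rw [if_pos ⟨by exact_mod_cast hj, hx⟩, if_pos hx]
        rw [PySem.List.pySetD_of_nonneg _ _ (by positivity)]
        simp only [Int.toNat_natCast]
        rw [List.getElem?_set_self (by omega)]
      · rw [if_neg (by tauto), if_neg hx]
    · -- s < j
      have heq : orig'[j]? = orig[j]? := by
        rw [horig']
        split
        · rw [PySem.List.pySetD_of_nonneg _ _ (by positivity)]
          rw [List.getElem?_set_ne (by simpa using by omega)]
        · rfl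
      have h3 : (s + 1 ≤ j ∧ j - (s + 1) < l.length) ↔ (s ≤ j ∧ j - s < l.length + 1) := by omega
      have h5 : j - (s + 1) = j - s - 1 := by omega
      have h4 : (x :: l).getD (j - s) 0 = l.getD (j - (s + 1)) 0 := by
        have : j - s = (j - (s + 1)) + 1 := by omega
        rw [this, List.getD_cons_succ]
      by_cases hcond : s + 1 ≤ j ∧ j - (s + 1) < l.length
      · simp only [if_pos hcond, List.length_cons, if_pos (h3.mp hcond), h4, heq]
      · simp only [if_neg hcond, List.length_cons, if_neg (fun h => hcond (h3.mpr h)), heq]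

theorem pv_inner_eq (cis : List Int) (block : List Char) (h : block.length ≤ cis.length) :
    pvInner cis block = (List.range block.length).map (fun k =>
      if cis.getD k 0 < (block.length : Int) then [(PySem.List.pyGet? block (cis.getD k 0)).getD ' '] else []) := by
  apply List.ext_getElem?
  intro j
  by_cases hj : j < block.length
  · have hget := pv_inner_get block.length
      (fun ci => [(PySem.List.pyGet? block ci).getD ' ']) cis 0
      (List.replicate block.length []) (by simp) j hj
    simp only [Nat.cast_zero] at hget
    rw [pvInner, hget]
    rw [List.getElem?_map, List.getElem?_range hj]
    have hc : 0 ≤ j ∧ j - 0 < cis.length := ⟨Nat.zero_le _, by omega⟩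
    rw [if_pos hc]
    simp only [Nat.sub_zero, Option.map_some]
    split
    · rfl
    · rw [List.getElem?_replicate, if_pos hj]
  · have h1 : (pvInner cis block).length = block.length := by
      rw [pvInner]
      rw [pv_fold_len block.length (fun ci => [(PySem.List.pyGet? block ci).getD ' ']) (PySem.List.enumerate cis) (List.replicate block.length [])]
      simp
    rw [List.getElem?_eq_none (by omega), List.getElem?_eq_none (by simp; omega)]

theorem pv_range_pos_nil (a b n : Int) (hn : 0 < n) (h : b ≤ a) :
    PySem.List.pyRange a b n = [] := by
  rw [PySem.List.pyRange_of_pos a b hn, if_neg (not_lt.2 h)]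
  simp

theorem pv_range_pos_cons (a b n : Int) (hn : 0 < n) (h : a < b) :
    PySem.List.pyRange a b n = a :: PySem.List.pyRange (a + n) b n := by
  rw [PySem.List.pyRange_of_pos a b hn, PySem.List.pyRange_of_pos (a + n) b hn, if_pos h]
  by_cases h2 : a + n < b
  · rw [if_pos h2]
    have harith : (b - a + n - 1) / n = (b - (a + n) + n - 1) / n + 1 := by
      have he : b - a + n - 1 = (b - (a + n) + n - 1) + 1 * n := by ring
      rw [he, Int.add_mul_ediv_right _ _ (by omega)]
    have hnn : 0 ≤ (b - (a + n) + n - 1) / n := Int.ediv_nonneg (by omega) (by omega)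
    have htn : ((b - a + n - 1) / n).toNat = ((b - (a + n) + n - 1) / n).toNat + 1 := by
      rw [harith]; omega
    rw [htn, List.range_succ_eq_map]
    simp only [List.map_cons, List.map_map, Nat.cast_zero, mul_zero, add_zero]
    refine congrArg (a :: ·) ?_
    apply List.map_congr_left
    intro k _
    simp only [Function.comp_apply]
    push_cast
    ring
  · rw [if_neg h2]
    have harith : (b - a + n - 1) / n = 1 := by
      rw [← PySem.Int.floordiv_eq_ediv_of_pos hn]
      exact (PySem.Int.floordiv_eq_iff_of_pos hn).mpr ⟨by omega, by omega⟩
    rw [harith]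
    simp

theorem pv_digit_cases (c : Char) (h : PySem.Chars.isdigit c = true) :
    c = '0' ∨ c = '1' ∨ c = '2' ∨ c = '3' ∨ c = '4' ∨ c = '5' ∨ c = '6' ∨ c = '7' ∨ c = '8' ∨ c = '9' := by
  simp only [PySem.Chars.isdigit, Bool.and_eq_true, decide_eq_true_eq, Char.le_def] at h
  obtain ⟨h1, h2⟩ := h
  have h1' : 48 ≤ c.toNat := h1
  have h2' : c.toNat ≤ 57 := h2
  have hv : c = Char.ofNat c.toNat := by rw [Char.ofNat_toNat]
  interval_cases hc : c.toNat <;> rw [hv] <;> decide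

theorem pv_digit_val (c : Char) (h : PySem.Chars.isdigit c = true) :
    PySem.Int.ofChars? [c] = some ((c.toNat : Int) - 48) ∧ 48 ≤ c.toNat ∧ c.toNat ≤ 57 := by
  rcases pv_digit_cases c h with h|h|h|h|h|h|h|h|h|h <;> subst h <;> refine ⟨by decide, by decide, by decide⟩

theorem pv_block_eq (t cs : List Char) (hd : ∀ c ∈ cs, PySem.Chars.isdigit c = true)
    (hne : cs ≠ []) (b : Nat) (hlt : b * cs.length < t.length) :
    (pvInner (pvCis cs) (PySem.List.slice t (some ((b * cs.length : Nat) : Int))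
        (some (((b * cs.length : Nat) : Int) + ((cs.length : Nat) : Int))))).flatten
      = (PySem.List.pyRange ((b * cs.length : Nat) : Int)
          ((min ((b + 1) * cs.length) t.length : Nat) : Int) 1).flatMap (pvBpiece t cs) := by
  have hn : 0 < cs.length := List.length_pos_iff.mpr hne
  set n := cs.length with hnd
  set a := b * n with had
  set L := t.length with hLd
  rw [PySem.List.slice_natCast_add]
  set block := List.take n (List.drop a t) with hblock
  have hblen : block.length = min n (L - a) := by
    simp [hblock, hLd]
  have hble : block.length ≤ (pvCis cs).length := by simp [pvCis, hblen]; omega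
  rw [pv_inner_eq _ _ hble]
  rw [← List.flatMap_def]
  rw [PySem.List.pyRange_one]
  have hstep : (b + 1) * n = a + n := by rw [had]; ring
  have hmm : ((min ((b + 1) * n) L : Nat) : Int) - ((a : Nat) : Int) = ((block.length : Nat) : Int) := by
    rw [hblen, hstep]; omega
  rw [hmm]
  simp only [Int.toNat_natCast]
  rw [List.flatMap_map]
  apply List.flatMap_congr
  intro k hk
  have hkb : k < block.length := List.mem_range.mp hk
  have hkn : k < n := by omega
  have hck : PySem.Chars.isdigit cs[k] = true := hd _ (List.getElem_mem _)
  obtain ⟨hval, h48, h57⟩ := pv_digit_val _ hck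
  have hcis : (pvCis cs).getD k 0 = (cs[k].toNat : Int) - 49 := by
    rw [pvCis, List.getD_eq_getElem _ _ (by simpa using hkn), List.getElem_map, hval]
    simp; ring
  have hcast : ((a : Nat) : Int) + ((k : Nat) : Int) = (((a + k : Nat)) : Int) := by push_cast; ring
  rw [pvBpiece, hcast]
  simp only [← hnd]
  rw [PySem.Int.mod_natCast, PySem.Int.floordiv_natCast]
  have hmodk : (a + k) % n = k := by
    rw [had, Nat.mul_comm b n, Nat.mul_add_mod, Nat.mod_eq_of_lt hkn]
  have hdivk : (a + k) / n = b := by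
    rw [had, Nat.mul_comm b n, Nat.mul_add_div hn, Nat.div_eq_of_lt hkn, Nat.add_zero]
  rw [hmodk, hdivk]
  have hstart : ((b : Nat) : Int) * ((n : Nat) : Int) = ((a : Nat) : Int) := by
    rw [had]; push_cast; ring
  rw [hstart, PySem.List.slice_natCast_add, ← hblock]
  rw [PySem.List.pyGet?_natCast, List.getElem?_eq_getElem hkn]
  simp only [Option.getD_some]
  rw [hval]
  simp only [Option.getD_some]
  rw [hcis]
  have h49 : (cs[k].toNat : Int) - 48 - 1 = (cs[k].toNat : Int) - 49 := by ring
  rw [h49]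

theorem pv_main (t cs : List Char) (hne : cs ≠ [])
    (hd : ∀ c ∈ cs, PySem.Chars.isdigit c = true) (k : Nat) :
    ∀ (b : Nat), t.length ≤ (b + k) * cs.length →
      (PySem.List.pyRange ((b * cs.length : Nat) : Int) ((t.length : Nat) : Int) ((cs.length : Nat) : Int)).flatMap
        (fun i => (pvInner (pvCis cs) (PySem.List.slice t (some i) (some (i + ((cs.length : Nat) : Int))))).flatten)
      = (PySem.List.pyRange ((b * cs.length : Nat) : Int) ((t.length : Nat) : Int) 1).flatMap (pvBpiece t cs) := by
  have hn : 0 < cs.length := List.length_pos_iff.mpr hne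
  induction k with
  | zero =>
    intro b hb
    rw [pv_range_pos_nil _ _ _ (by exact_mod_cast hn) (by exact_mod_cast (by simpa using hb)),
      PySem.List.pyRange_one_eq_nil (by exact_mod_cast (by simpa using hb))]
    simp
  | succ k ih =>
    intro b hb
    by_cases hlt : b * cs.length < t.length
    · rw [pv_range_pos_cons _ _ _ (by exact_mod_cast hn) (by exact_mod_cast hlt)]
      have hstep : ((b * cs.length : Nat) : Int) + ((cs.length : Nat) : Int) = (((b + 1) * cs.length : Nat) : Int) := by
        push_cast; ring
      rw [hstep, List.flatMap_cons]
      have hm1 : ((b * cs.length : Nat) : Int) ≤ ((min ((b + 1) * cs.length) t.length : Nat) : Int) := by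
        have : b * cs.length ≤ min ((b + 1) * cs.length) t.length := by
          refine le_min (by nlinarith) (le_of_lt hlt)
        exact_mod_cast this
      have hm2 : ((min ((b + 1) * cs.length) t.length : Nat) : Int) ≤ ((t.length : Nat) : Int) := by
        exact_mod_cast min_le_right _ _
      rw [PySem.List.pyRange_one_append _ _ _ hm1 hm2, List.flatMap_append]
      congr 1
      · exact pv_block_eq t cs hd hne b hlt
      · have hb' : t.length ≤ (b + 1 + k) * cs.length := by
          have he : (b + 1 + k) = (b + (k + 1)) := by ring
          rw [he]; exact hb
        have ih' := ih (b + 1) hb'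
        by_cases hc : (b + 1) * cs.length ≤ t.length
        · rw [min_eq_left hc]; exact ih'
        · rw [min_eq_right (by omega)]
          rw [pv_range_pos_nil _ _ _ (by exact_mod_cast hn) (by exact_mod_cast (by omega : t.length ≤ (b + 1) * cs.length)),
            PySem.List.pyRange_one_eq_nil (le_refl _)]
          simp
    · have hle : t.length ≤ b * cs.length := by omega
      rw [pv_range_pos_nil _ _ _ (by exact_mod_cast hn) (by exact_mod_cast hle),
        PySem.List.pyRange_one_eq_nil (by exact_mod_cast hle)]
      simp

theorem pv_flatten_pieceL (t cs : List Char) (i : Int) :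
    (pvBpieceL t cs i).flatten = pvBpiece t cs i := by
  rw [pvBpieceL, pvBpiece]
  split <;> rfl

theorem pv_flatten_flatMap {α β : Type} (l : List α) (f : α → List (List β)) :
    (l.flatMap f).flatten = l.flatMap (fun x => (f x).flatten) := by
  induction l with
  | nil => rfl
  | cons x l ih => simp [List.flatMap_cons, ih]

theorem pv_join_nil (ps : List (List Char)) : PySem.Chars.join [] ps = ps.flatten := by
  show [].intercalate ps = ps.flatten
  rw [List.intercalate]
  induction ps with
  | nil => rfl
  | cons x ps ih =>
    cases ps with
    | nil => simp
    | cons y ps => simp_all [List.intersperse]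

theorem pv_final (text code : String)
    (hne : code.toList ≠ []) (hd : ∀ c ∈ code.toList, PySem.Chars.isdigit c = true) :
    inverse_permute_text text code = inverse_permute_text_alt text code := by
  rw [inverse_permute_text, inverse_permute_text_alt]
  show String.ofList (PySem.Chars.join []
      ((PySem.List.pyRange 0 (text.toList.length : Int) ((pvCis code.toList).length : Int)).foldl
        (fun result i => result ++ pvInner (pvCis code.toList)
          (PySem.List.slice text.toList (some i) (some (i + ((pvCis code.toList).length : Int))))) []))
    = String.ofList (PySem.Chars.join []
      ((PySem.List.pyRange 0 (text.toList.length : Int) 1).foldl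
        (fun out i =>
          if ((PySem.Int.ofChars? [(PySem.List.pyGet? code.toList (PySem.Int.mod i (code.toList.length : Int))).getD ' ']).getD 0 - 1) < ((PySem.List.slice text.toList (some (PySem.Int.floordiv i (code.toList.length : Int) * (code.toList.length : Int))) (some (PySem.Int.floordiv i (code.toList.length : Int) * (code.toList.length : Int) + (code.toList.length : Int)))).length : Int) then
            out ++ [[(PySem.List.pyGet? (PySem.List.slice text.toList (some (PySem.Int.floordiv i (code.toList.length : Int) * (code.toList.length : Int))) (some (PySem.Int.floordiv i (code.toList.length : Int) * (code.toList.length : Int) + (code.toList.length : Int)))) ((PySem.Int.ofChars? [(PySem.List.pyGet? code.toList (PySem.Int.mod i (code.toList.length : Int))).getD ' ']).getD 0 - 1)).getD ' ']]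
          else out) []))
  have hbodyB : (fun (out : List (List Char)) (i : Int) =>
          if ((PySem.Int.ofChars? [(PySem.List.pyGet? code.toList (PySem.Int.mod i (code.toList.length : Int))).getD ' ']).getD 0 - 1) < ((PySem.List.slice text.toList (some (PySem.Int.floordiv i (code.toList.length : Int) * (code.toList.length : Int))) (some (PySem.Int.floordiv i (code.toList.length : Int) * (code.toList.length : Int) + (code.toList.length : Int)))).length : Int) then
            out ++ [[(PySem.List.pyGet? (PySem.List.slice text.toList (some (PySem.Int.floordiv i (code.toList.length : Int) * (code.toList.length : Int))) (some (PySem.Int.floordiv i (code.toList.length : Int) * (code.toList.length : Int) + (code.toList.length : Int)))) ((PySem.Int.ofChars? [(PySem.List.pyGet? code.toList (PySem.Int.mod i (code.toList.length : Int))).getD ' ']).getD 0 - 1)).getD ' ']]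
          else out)
      = fun out i => out ++ pvBpieceL text.toList code.toList i := by
    funext out i
    rw [pvBpieceL]
    split <;> simp_all
  rw [hbodyB]
  rw [PySem.List.foldl_append_eq_flatMap (fun i => pvInner (pvCis code.toList)
        (PySem.List.slice text.toList (some i) (some (i + ((pvCis code.toList).length : Int)))))]
  rw [PySem.List.foldl_append_eq_flatMap (pvBpieceL text.toList code.toList)]
  simp only [List.nil_append]
  rw [pv_join_nil, pv_join_nil, pv_flatten_flatMap, pv_flatten_flatMap]
  have hlen : ((pvCis code.toList).length : Int) = (code.toList.length : Int) := by
    simp [pvCis]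
  rw [hlen]
  have hmain := pv_main text.toList code.toList hne hd text.toList.length 0
    (by have hn : 0 < code.toList.length := List.length_pos_iff.mpr hne
        calc text.toList.length = text.toList.length * 1 := by ring
        _ ≤ (0 + text.toList.length) * code.toList.length := by
              rw [Nat.zero_add]; exact Nat.mul_le_mul_left _ hn)
  simp only [Nat.zero_mul, Nat.cast_zero] at hmain
  rw [hmain]
  congr 1
  apply List.flatMap_congr
  intro i _
  rw [pv_flatten_pieceL]

-- ===== VERDICT (by name: the statement is the Claim_ definition above) =====
theorem inverse_permute_text_spec : Claim_equal_inverse_permute_text := by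
  intro text code _ hpre
  show inverse_permute_text text code = inverse_permute_text_alt text code
  exact pv_final text code hpre.1 (by simpa using List.all_eq_true.mp hpre.2)
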